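-- pv_equiv track=rewrite | github.com/smartliuhw/RAG | mid2name.py | merge_mid2name
-- ===== SOURCE A (Python) =====
-- def merge_mid2name(mid2names):
--     final_mid2name = {}
--
--     for mid2name in mid2names:
--         for mid, name in mid2name.items():
--             if mid in final_mid2name:
--                 if name[-2:] == 'en':
--                     final_mid2name[mid] = name
--                 else:
--                     continue
--             else:
--                 final_mid2name[mid] = name
--
--     return final_mid2name
-- ===== SOURCE B (Python) =====
-- def merge_mid2name(mid2names):
--     # group every name under its mid (keys in first-occurrence order), then
--     # per key select: the last name ending in 'en' wins, else the first-seen name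
--     items = [(mid, name) for mid2name in mid2names for mid, name in mid2name.items()]
--     groups = {}
--     for mid, name in items:
--         groups.setdefault(mid, []).append(name)
--
--     def choose(names):
--         ens = [name for name in names if name[-2:] == 'en']
--         if ens:
--             return ens[-1]
--         return names[0]
--
--     return {mid: choose(names) for mid, names in groups.items()}
-- ===== Notes on version B (the rewrite author's own statement) =====
-- stated objective: alternative
-- what changed: Replaces A's sequential dict merge (insert-if-absent, conditional 'en' overwrite per item) by group-then-select: flatten all items once, group every name under its mid in one pass, then for each key pick the last name whose final two characters are 'en' if one exists, else the first-seen name.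
import Mathlib
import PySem

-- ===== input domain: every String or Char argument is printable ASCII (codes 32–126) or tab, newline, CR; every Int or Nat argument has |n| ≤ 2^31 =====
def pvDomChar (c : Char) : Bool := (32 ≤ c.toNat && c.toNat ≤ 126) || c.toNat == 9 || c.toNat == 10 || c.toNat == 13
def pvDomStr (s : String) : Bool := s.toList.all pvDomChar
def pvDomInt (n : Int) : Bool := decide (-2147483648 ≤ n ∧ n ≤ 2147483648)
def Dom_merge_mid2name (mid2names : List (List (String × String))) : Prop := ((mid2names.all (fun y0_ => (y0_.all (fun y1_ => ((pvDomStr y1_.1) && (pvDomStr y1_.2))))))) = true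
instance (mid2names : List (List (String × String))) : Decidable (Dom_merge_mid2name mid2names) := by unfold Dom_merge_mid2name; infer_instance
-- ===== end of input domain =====

-- B replaces A's sequential dict merge by group-then-select over the flattened items: one pass
-- groups names per mid, then each key takes its last 'en' name if any, else its first-seen name
-- — objective: alternative algorithm, same cost.

-- ===== PORT A =====
-- name[-2:] == 'en'
def pvEn (name : String) : Bool := PySem.Str.slice name (some (-2)) none == "en"

-- loop body of A: insert if absent, else overwrite only when the name ends in 'en'
def pvStepA (acc : PySem.Dict String String) (p : String × String) : PySem.Dict String String :=
  if acc.contains p.1 then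
    if pvEn p.2 then acc.insert p.1 p.2 else acc
  else acc.insert p.1 p.2

def merge_mid2name (mid2names : List (List (String × String))) : List (String × String) :=
  (mid2names.foldl (fun acc mid2name => mid2name.foldl pvStepA acc) PySem.Dict.empty).items

-- ===== PORT B =====
-- choose(names): the last name ending in 'en' if any, else the first name
-- (headD "" ports names[0]; in B it is only applied to non-empty group lists)
def pvChoose (names : List String) : String :=
  match (names.filter pvEn).getLast? with
  | some n => n
  | none => names.headD ""

-- groups.setdefault(mid, []).append(name): the list at key mid gains name at the end
def merge_mid2name_alt (mid2names : List (List (String × String))) : List (String × String) :=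
  let items := mid2names.flatten
  let groups := items.foldl (fun g p => g.modify p.1 [] (· ++ [p.2])) PySem.Dict.empty
  groups.items.map (fun q => (q.1, pvChoose q.2))

-- ===== PRECONDITION & SPEC =====
def Spec_merge_mid2name (mid2names : List (List (String × String))) (out : List (String × String)) : Prop := out = merge_mid2name_alt mid2names
instance (mid2names : List (List (String × String))) (out : List (String × String)) : Decidable (Spec_merge_mid2name mid2names out) := by unfold Spec_merge_mid2name; infer_instance

-- ===== CLAIM (what is proved, stated in full; the proofs are below) =====
def Claim_equal_merge_mid2name : Prop := ∀ (mid2names : List (List (String × String))), Dom_merge_mid2name mid2names → Spec_merge_mid2name mid2names (merge_mid2name mid2names)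

-- ===== LEMMAS AND PROOFS =====

-- proof-side abbreviation: what B's per-key selection computes, read off the flat item list
def pvSel (items : List (String × String)) (k : String) : String :=
  match ((items.filter (fun p => p.1 == k && pvEn p.2)).map Prod.snd).getLast? with
  | some n => n
  | none => ((items.filter (fun p => p.1 == k)).map Prod.snd).headD ""

-- choose of a key's group list is pvSel of that key
theorem pv_choose_eq_sel (items : List (String × String)) (k : String) :
    pvChoose ((items.filter (fun p => p.1 == k)).map Prod.snd) = pvSel items k := by
  unfold pvChoose pvSel
  rw [List.filter_map, List.filter_filter]
  have hpred : ∀ a ∈ items, ((pvEn ∘ Prod.snd) a && (a.1 == k)) = (a.1 == k && pvEn a.2) := by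
    intro a _
    simp [Function.comp, Bool.and_comm]
  rw [List.filter_congr hpred]

-- a non-'en' item appended at the end never enters the 'en' filter
theorem pv_filter_en_append (items : List (String × String)) (p : String × String)
    (hen : pvEn p.2 = false) (k : String) :
    (items ++ [p]).filter (fun q => q.1 == k && pvEn q.2)
      = items.filter (fun q => q.1 == k && pvEn q.2) := by
  simp [List.filter_append, hen]

-- appending an item with a different key does not change choose
theorem pv_sel_append_ne (items : List (String × String)) (p : String × String)
    (k : String) (h : k ≠ p.1) : pvSel (items ++ [p]) k = pvSel items k := by
  have hb : (p.1 == k) = false := beq_eq_false_iff_ne.mpr (Ne.symm h)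
  unfold pvSel
  simp [List.filter_append, hb]

-- appending an 'en' item makes its name the chosen one for its key
theorem pv_sel_append_en (items : List (String × String)) (p : String × String)
    (h : pvEn p.2 = true) : pvSel (items ++ [p]) p.1 = p.2 := by
  unfold pvSel
  simp [List.filter_append, h]

-- appending a non-'en' item with a fresh key chooses its name (the first for that key)
theorem pv_sel_append_fresh (items : List (String × String)) (p : String × String)
    (hen : pvEn p.2 = false) (hfresh : p.1 ∉ items.map Prod.fst) :
    pvSel (items ++ [p]) p.1 = p.2 := by
  have hnil : items.filter (fun q => q.1 == p.1) = [] := by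
    rw [List.filter_eq_nil_iff]
    intro q hq
    simp only [beq_iff_eq]
    exact fun he => hfresh (he ▸ List.mem_map_of_mem hq)
  have hnil2 : items.filter (fun q => q.1 == p.1 && pvEn q.2) = [] := by
    rw [List.filter_eq_nil_iff]
    intro q hq hb
    exact absurd (List.filter_eq_nil_iff.mp hnil q hq) (by simp_all)
  unfold pvSel
  rw [pv_filter_en_append items p hen, hnil2]
  simp [List.filter_append, hnil]

-- appending a non-'en' item with an already-seen key does not change choose
theorem pv_sel_append_seen (items : List (String × String)) (p : String × String)
    (hen : pvEn p.2 = false) (hseen : p.1 ∈ items.map Prod.fst) :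
    pvSel (items ++ [p]) p.1 = pvSel items p.1 := by
  obtain ⟨q, hq, hqk⟩ := List.mem_map.mp hseen
  unfold pvSel
  rw [pv_filter_en_append items p hen]
  rcases hc : ((items.filter (fun q => q.1 == p.1 && pvEn q.2)).map Prod.snd).getLast? with _ | n
  · rw [hc]
    rcases hf : items.filter (fun q => q.1 == p.1) with _ | ⟨r, t⟩
    · exact absurd (List.filter_eq_nil_iff.mp hf q hq) (by simp [hqk])
    · simp [List.filter_append, hf]
  · rw [hc]

-- the invariant: A's fold over any item list yields exactly B's per-key table
theorem pv_main (items : List (String × String)) :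
    (items.foldl pvStepA PySem.Dict.empty).items
      = (PySem.List.dedup (items.map Prod.fst)).map (fun k => (k, pvSel items k)) := by
  induction items using List.reverseRecOn with
  | nil => rfl
  | append_singleton items p ih =>
      rw [List.foldl_append, List.foldl_cons, List.foldl_nil]
      set d := items.foldl pvStepA PySem.Dict.empty with hd
      set K := PySem.List.dedup (items.map Prod.fst) with hK
      have hkeys : d.keys = K := by
        simp [PySem.Dict.keys, ih, List.map_map, Function.comp_def]
      have hcont : d.contains p.1 = decide (p.1 ∈ K) := by
        rw [PySem.Dict.contains_eq_decide_mem_keys, hkeys]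
      have hKd : PySem.List.dedup ((items ++ [p]).map Prod.fst)
          = PySem.Set.add K p.1 := by
        simp only [List.map_append, List.map_cons, List.map_nil, hK,
          PySem.List.dedup_eq_ofList, PySem.Set.ofList_append_singleton]
      have hmemK : p.1 ∈ K ↔ p.1 ∈ items.map Prod.fst := by
        simp [hK]
      by_cases hmem : p.1 ∈ K
      · rw [hKd, PySem.Set.add_of_mem hmem]
        have hct : d.contains p.1 = true := by simp [hcont, hmem]
        by_cases hen : pvEn p.2 = true
        · unfold pvStepA
          rw [if_pos hct, if_pos hen, PySem.Dict.items_insert_of_contains d p.2 hct, ih,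
            List.map_map]
          apply List.map_congr_left
          intro k hk
          by_cases hkp : k = p.1
          · subst hkp
            simp [pv_sel_append_en items p hen]
          · simp [hkp, pv_sel_append_ne items p k hkp]
        · have hen' : pvEn p.2 = false := by simpa using hen
          unfold pvStepA
          rw [if_pos hct, if_neg (by simp [hen']), ih]
          apply List.map_congr_left
          intro k hk
          by_cases hkp : k = p.1
          · subst hkp
            rw [pv_sel_append_seen items p hen' (hmemK.mp hmem)]
          · rw [pv_sel_append_ne items p k hkp]
      · rw [hKd, PySem.Set.add_of_not_mem hmem]
        have hct : d.contains p.1 = false := by simp [hcont, hmem]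
        unfold pvStepA
        rw [if_neg (by simp [hct]), PySem.Dict.items_insert_of_not_contains d p.2 hct, ih,
          List.map_append]
        congr 1
        · apply List.map_congr_left
          intro k hk
          have hkp : k ≠ p.1 := fun he => hmem (he ▸ hk)
          rw [pv_sel_append_ne items p k hkp]
        · have hch : pvSel (items ++ [p]) p.1 = p.2 := by
            by_cases hen : pvEn p.2 = true
            · exact pv_sel_append_en items p hen
            · exact pv_sel_append_fresh items p (by simpa using hen)
                (fun h => hmem (hmemK.mpr h))
          simp [hch]

-- B's grouping dict, read off: its items are the first-occurrence keys, each with its pvSel value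
theorem pv_groups (items : List (String × String)) :
    ((items.foldl (fun g p => g.modify p.1 [] (· ++ [p.2])) PySem.Dict.empty).items).map
        (fun q => (q.1, pvChoose q.2))
      = (PySem.List.dedup (items.map Prod.fst)).map (fun k => (k, pvSel items k)) := by
  set G := items.foldl (fun g p => g.modify p.1 [] (· ++ [p.2])) PySem.Dict.empty with hG
  have hnd : G.keys.Nodup := by
    rw [hG]
    exact PySem.Dict.nodup_keys_foldl_modify_key items Prod.fst [] _ PySem.Dict.empty
      (by simp)
  have hkeys : G.keys = PySem.List.dedup (items.map Prod.fst) := by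
    rw [hG, PySem.Dict.keys_foldl_modify_key]
    simp [PySem.Set.update_nil_left]
  rw [PySem.Dict.items_eq_map_keys G hnd [], hkeys, List.map_map]
  apply List.map_congr_left
  intro k hk
  have hgd : G.getD k [] = (items.filter (fun p => p.1 == k)).map Prod.snd := by
    rw [hG, PySem.Dict.getD_foldl_modify_append]
    simp
  simp only [Function.comp_apply, hgd, pv_choose_eq_sel]

-- ===== VERDICT (by name: the statement is the Claim_ definition above) =====
theorem merge_mid2name_spec : Claim_equal_merge_mid2name := by
  intro m _
  unfold Spec_merge_mid2name merge_mid2name merge_mid2name_alt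
  rw [← List.foldl_flatten (f := pvStepA), pv_main m.flatten, ← pv_groups m.flatten]
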